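-- pv_equiv track=rewrite | github.com/rilp/hackerearth | MaximumBorders.py | get_max_blacks
-- ===== SOURCE A (Python) =====
-- def get_max_blacks(matrix:list):
--     max_blacks = 0
--
--     for row in matrix:
--         blacks_in_a_row = 0
--         prev_cell = ''
--         for current in row:
--             if prev_cell == '.' and current == '#':
--                 blacks_in_a_row = 1
--             elif current == '#':
--                 blacks_in_a_row += 1
--             prev_cell = current
--
--             if blacks_in_a_row > max_blacks:
--                 max_blacks = blacks_in_a_row
--     return max_blacks
-- ===== SOURCE B (Python) =====
-- def get_max_blacks(matrix: list):
--     best = 0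
--     for row in matrix:
--         # prefix[i] = number of black cells among the first i cells of the row
--         prefix = [0]
--         for cell in row:
--             prefix.append(prefix[-1] + (cell == '#'))
--         # a new streak of black cells starts wherever '#' directly follows '.'
--         breaks = [0]
--         for i, (left, right) in enumerate(zip(row, row[1:])):
--             if left == '.' and right == '#':
--                 breaks.append(i + 1)
--         breaks.append(len(row))
--         # the longest streak is the largest number of blacks between consecutive breaks
--         for b1, b2 in zip(breaks, breaks[1:]):
--             if prefix[b2] - prefix[b1] > best:
--                 best = prefix[b2] - prefix[b1]
--     return best
-- ===== Notes on version B (the rewrite author's own statement) =====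
-- stated objective: alternative
-- what changed: B replaces A's running reset-counter scan with prefix counts of black cells plus a list of streak-break positions (a streak starts where '#' directly follows '.'), returning the largest prefix-count difference between consecutive breaks.
import Mathlib
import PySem

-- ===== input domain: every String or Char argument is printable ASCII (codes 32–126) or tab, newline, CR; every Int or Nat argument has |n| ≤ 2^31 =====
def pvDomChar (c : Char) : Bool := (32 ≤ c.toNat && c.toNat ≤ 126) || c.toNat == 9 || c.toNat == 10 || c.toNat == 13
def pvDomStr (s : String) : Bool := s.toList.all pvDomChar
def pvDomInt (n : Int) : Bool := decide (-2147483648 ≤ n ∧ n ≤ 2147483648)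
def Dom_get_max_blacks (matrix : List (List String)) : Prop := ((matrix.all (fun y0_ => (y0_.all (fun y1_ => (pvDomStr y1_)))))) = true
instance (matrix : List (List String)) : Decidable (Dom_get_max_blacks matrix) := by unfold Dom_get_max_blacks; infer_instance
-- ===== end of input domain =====

-- B finds the maximum number of black cells in a streak via prefix counts and a list of
-- streak-break positions (a streak starts where '#' directly follows '.'); objective: alternative.

-- ===== PORT A =====
-- inner loop of A over a row: state (blacks_in_a_row, prev_cell, max_blacks)
def pvAInner : List String → Int → String → Int → Int
  | [], _, _, m => m
  | c :: cs, b, prev, m =>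
    let b' := if prev == "." && c == "#" then 1 else if c == "#" then b + 1 else b
    pvAInner cs b' c (if b' > m then b' else m)

def get_max_blacks (matrix : List (List String)) : Int :=
  matrix.foldl (fun max_blacks row => pvAInner row 0 "" max_blacks) 0

-- ===== PORT B =====
-- prefix counts of black cells: prefix[i] = blacks among the first i cells (loop carrying prefix[-1])
def pvPrefix : List String → Int → List Int
  | [], acc => [acc]
  | c :: cs, acc => acc :: pvPrefix cs (acc + (if c == "#" then 1 else 0))

-- break positions: i+1 for each adjacent pair (left, right) = ('.', '#') at index i
def pvBreaksRec : List (String × String) → Nat → List Nat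
  | [], _ => []
  | (l, r) :: ps, i =>
    if l == "." && r == "#" then (i + 1) :: pvBreaksRec ps (i + 1) else pvBreaksRec ps (i + 1)

-- per-row body of B's outer loop
def pvRowBest (best : Int) (row : List String) : Int :=
  let pfx := pvPrefix row 0
  let breaks := (0 :: pvBreaksRec (row.zip row.tail) 0) ++ [row.length]
  (breaks.zip breaks.tail).foldl (fun b p =>
    let d := pfx.getD p.2 0 - pfx.getD p.1 0
    if d > b then d else b) best

def get_max_blacks_alt (matrix : List (List String)) : Int :=
  matrix.foldl pvRowBest 0

-- ===== PRECONDITION & SPEC =====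
def Spec_get_max_blacks (matrix : List (List String)) (out : Int) : Prop := out = get_max_blacks_alt matrix
instance (matrix : List (List String)) (out : Int) : Decidable (Spec_get_max_blacks matrix out) := by unfold Spec_get_max_blacks; infer_instance

-- ===== CLAIM (what is proved, stated in full; the proofs are below) =====
def Claim_equal_get_max_blacks : Prop := ∀ (matrix : List (List String)), Dom_get_max_blacks matrix → Spec_get_max_blacks matrix (get_max_blacks matrix)

-- ===== LEMMAS AND PROOFS =====

def pvInd (c : String) : Int := if c == "#" then 1 else 0

def pvCnt : List String → Int
  | [] => 0
  | c :: l => pvInd c + pvCnt l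

theorem pvInd_nonneg (c : String) : 0 ≤ pvInd c := by
  unfold pvInd; split <;> omega

theorem pvCnt_append : ∀ (l1 l2 : List String), pvCnt (l1 ++ l2) = pvCnt l1 + pvCnt l2 := by
  intro l1 l2
  induction l1 with
  | nil => simp [pvCnt]
  | cons c l ih => simp [pvCnt, ih]; omega

-- values of pvCnt ∘ (row.take ·) at the break positions, computed by one walk over the row
def pvG : List String → String → Int → List Int
  | [], _, acc => [acc]
  | c :: cs, prev, acc =>
    if prev == "." && c == "#" then acc :: pvG cs c (acc + pvInd c)
    else pvG cs c (acc + pvInd c)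

-- fold of max over consecutive differences of a list
def pvDfold : Int → List Int → Int
  | b, x :: y :: rest => pvDfold (if y - x > b then y - x else b) (y :: rest)
  | b, _ => b

theorem pvG_head : ∀ (cs : List String) (prev : String) (acc : Int),
    ∃ h rest, pvG cs prev acc = h :: rest ∧ acc ≤ h := by
  intro cs
  induction cs with
  | nil => intro prev acc; exact ⟨acc, [], rfl, le_rfl⟩
  | cons c cs ih =>
    intro prev acc
    by_cases hb : (prev == "." && c == "#") = true
    · exact ⟨acc, pvG cs c (acc + pvInd c), by simp [pvG, hb], le_rfl⟩
    · obtain ⟨h, rest, heq, hle⟩ := ih c (acc + pvInd c)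
      have := pvInd_nonneg c
      exact ⟨h, rest, by simp [pvG, hb, heq], by omega⟩

theorem pvDfold_absorb (b x base h : Int) (rest : List Int) (hx : x ≤ h - base) :
    pvDfold (if x > b then x else b) (base :: h :: rest) = pvDfold b (base :: h :: rest) := by
  simp only [pvDfold]
  congr 1
  split_ifs <;> omega

-- MAIN: the max of consecutive differences of (base :: g-values) is A's inner loop
theorem pvMain : ∀ (cs : List String) (prev : String) (t m base : Int),
    0 ≤ t → t ≤ m →
    pvDfold m (base :: pvG cs prev (base + t)) = pvAInner cs t prev m := by
  intro cs
  induction cs with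
  | nil =>
    intro prev t m base _ htm
    simp only [pvG, pvDfold, pvAInner]
    split_ifs <;> omega
  | cons c cs ih =>
    intro prev t m base ht htm
    by_cases hb : (prev == "." && c == "#") = true
    · -- a new streak starts: A resets its counter to 1
      have hc : c = "#" := by
        rw [Bool.and_eq_true] at hb; simpa using hb.2
      have hind : pvInd c = 1 := by simp [pvInd, hc]
      rw [pvAInner]
      simp only [hb, if_true]
      rw [pvG]
      simp only [hb, if_true, hind]
      -- LHS: pvDfold m (base :: (base+t) :: pvG cs c (base+t+1))
      have hstep : pvDfold m (base :: (base + t) :: pvG cs c (base + t + 1))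
          = pvDfold m ((base + t) :: pvG cs c (base + t + 1)) := by
        simp only [pvDfold]
        congr 1; omega
      rw [hstep]
      obtain ⟨h, rest, heq, hle⟩ := pvG_head cs c (base + t + 1)
      have habs : pvDfold (if (1:Int) > m then 1 else m) ((base + t) :: h :: rest)
          = pvDfold m ((base + t) :: h :: rest) :=
        pvDfold_absorb m 1 (base + t) h rest (by omega)
      rw [heq, ← habs, ← heq]
      have : base + t + 1 = (base + t) + 1 := by ring
      rw [this, ih c 1 (if (1:Int) > m then 1 else m) (base + t) (by omega) (by split_ifs <;> omega)]
    · -- streak continues: A's counter becomes t + pvInd c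
      have hb' : (prev == "." && c == "#") = false := by simpa using hb
      rw [pvAInner]
      simp only [hb', Bool.false_eq_true, if_false]
      rw [pvG]
      simp only [hb', Bool.false_eq_true, if_false]
      have hbody : (if c == "#" then t + 1 else t) = t + pvInd c := by
        unfold pvInd; split_ifs <;> omega
      rw [hbody]
      rw [show base + t + pvInd c = base + (t + pvInd c) from by ring]
      obtain ⟨h, rest, heq, hle⟩ := pvG_head cs c (base + (t + pvInd c))
      have habs : pvDfold (if t + pvInd c > m then t + pvInd c else m) (base :: h :: rest)
          = pvDfold m (base :: h :: rest) :=
        pvDfold_absorb m (t + pvInd c) base h rest (by have := pvInd_nonneg c; omega)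
      rw [heq, ← habs, ← heq]
      exact ih c (t + pvInd c) (if t + pvInd c > m then t + pvInd c else m) base
        (by have := pvInd_nonneg c; omega) (by split_ifs <;> omega)

-- prefix list lookups are counts of black cells in prefixes
theorem pvPrefix_getD : ∀ (row : List String) (a : Int) (i : Nat), i ≤ row.length →
    (pvPrefix row a).getD i 0 = a + pvCnt (row.take i) := by
  intro row
  induction row with
  | nil =>
    intro a i hi
    have h0 : i = 0 := Nat.le_zero.mp (by simpa using hi)
    subst h0
    simp [pvPrefix, pvCnt]
  | cons c cs ih =>
    intro a i hi
    cases i with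
    | zero => simp [pvPrefix, pvCnt]
    | succ j =>
      have hj : j ≤ cs.length := by simpa using hi
      simp only [pvPrefix, List.getD_cons_succ, List.take_succ_cons, pvCnt, ih _ j hj]
      unfold pvInd; split <;> omega

-- every emitted break position is bounded by i + number of remaining pairs
theorem pvBreaksRec_le : ∀ (ps : List (String × String)) (i : Nat),
    ∀ b ∈ pvBreaksRec ps i, b ≤ i + ps.length := by
  intro ps
  induction ps with
  | nil => intro i b hb; simp [pvBreaksRec] at hb
  | cons p ps ih =>
    intro i b hb
    obtain ⟨l, r⟩ := p
    by_cases hc : (l == "." && r == "#") = true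
    · simp only [pvBreaksRec, hc, if_true, List.mem_cons] at hb
      rcases hb with h | h
      · subst h; simp only [List.length_cons]; omega
      · have := ih (i + 1) b h; simp only [List.length_cons] at this ⊢; omega
    · have hc' : (l == "." && r == "#") = false := by simpa using hc
      simp only [pvBreaksRec, hc', Bool.false_eq_true, if_false] at hb
      have := ih (i + 1) b hb; simp at this ⊢; omega

-- fold over consecutive zip pairs mapped through g = pvDfold over the mapped list
theorem pvZipFold_map : ∀ (l : List Nat) (g : Nat → Int) (b : Int),
    (l.zip l.tail).foldl (fun b p => if g p.2 - g p.1 > b then g p.2 - g p.1 else b) b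
      = pvDfold b (l.map g) := by
  intro l
  induction l with
  | nil => intro g b; simp [pvDfold]
  | cons x l ih =>
    intro g b
    cases l with
    | nil => simp [pvDfold]
    | cons y rest =>
      simp only [List.tail_cons, List.zip_cons_cons, List.foldl_cons, List.map_cons]
      rw [show ((y :: rest).zip rest) = ((y :: rest).zip (y :: rest).tail) by simp]
      rw [ih g _]
      simp [pvDfold]

-- the mapped break list is exactly base-count :: pvG of the remaining row
theorem pvLemA : ∀ (cs done : List String) (c : String),
    (pvBreaksRec ((c :: cs).zip cs) done.length ++ [done.length + 1 + cs.length]).map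
        (fun b => pvCnt ((done ++ c :: cs).take b))
      = pvG cs c (pvCnt (done ++ [c])) := by
  intro cs
  induction cs with
  | nil =>
    intro done c
    simp only [List.zip_nil_right, pvBreaksRec, List.nil_append, List.length_nil,
      List.map_cons, List.map_nil, pvG]
    have : (done ++ [c]).take (done.length + 1 + 0) = done ++ [c] := by
      apply List.take_of_length_le; simp
    simp [this]
  | cons c' cs' ih =>
    intro done c
    have hrow : done ++ c :: c' :: cs' = (done ++ [c]) ++ c' :: cs' := by simp
    have htake : ((done ++ [c]) ++ c' :: cs').take (done.length + 1) = done ++ [c] := by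
      have hlen : (done ++ [c]).length = done.length + 1 := by simp
      rw [← hlen, List.take_left]
    have hacc : pvCnt ((done ++ [c]) ++ [c']) = pvCnt (done ++ [c]) + pvInd c' := by
      rw [pvCnt_append]; simp [pvCnt]
    have hlen' : (done ++ [c]).length = done.length + 1 := by simp
    have harith : done.length + 1 + (cs'.length + 1) = done.length + 1 + 1 + cs'.length := by
      omega
    have hih := ih (done ++ [c]) c'
    rw [hlen', hacc] at hih
    by_cases hc : (c == "." && c' == "#") = true
    · simp only [List.zip_cons_cons, pvBreaksRec, hc, if_true, List.cons_append,
        List.map_cons, List.length_cons, pvG]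
      congr 1
      · rw [hrow, htake]
      · rw [hrow, harith]
        exact hih
    · have hc' : (c == "." && c' == "#") = false := by simpa using hc
      simp only [List.zip_cons_cons, pvBreaksRec, hc', Bool.false_eq_true, if_false,
        List.length_cons, pvG]
      rw [hrow, harith]
      exact hih

-- breaks mapped through pvCnt∘take = 0 :: pvG row "" 0, uniformly (including the empty row)
theorem pvMapG (row : List String) :
    ((0 :: pvBreaksRec (row.zip row.tail) 0) ++ [row.length]).map
        (fun b => pvCnt (row.take b))
      = 0 :: pvG row "" 0 := by
  cases row with
  | nil => simp [pvBreaksRec, pvCnt, pvG]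
  | cons c cs =>
    simp only [List.cons_append, List.map_cons, List.take_zero, pvCnt, List.tail_cons]
    congr 1
    · have := pvLemA cs [] c
      simp only [List.length_nil, List.nil_append, Nat.zero_add] at this
      have hlen : (0:Nat) + 1 + cs.length = (c :: cs).length := by simp; omega
      rw [hlen] at this
      rw [this]
      have h0 : (("" == ".") && (c == "#")) = false := by
        have : (("" : String) == ".") = false := by decide
        simp [this]
      rw [pvG]
      simp only [h0, Bool.false_eq_true, if_false]
      have : pvCnt [c] = 0 + pvInd c := by simp [pvCnt]
      rw [this]

-- per-row equality
theorem pvRow_eq (row : List String) (m : Int) (hm : 0 ≤ m) :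
    pvRowBest m row = pvAInner row 0 "" m := by
  unfold pvRowBest
  set breaks := (0 :: pvBreaksRec (row.zip row.tail) 0) ++ [row.length] with hbreaks
  -- step 1: replace getD lookups by prefix counts (all break positions are ≤ row.length)
  have hbnd : ∀ b ∈ breaks, b ≤ row.length := by
    intro b hb
    rw [hbreaks] at hb
    simp only [List.cons_append, List.mem_cons] at hb
    rcases hb with h | hb
    · omega
    rcases List.mem_append.mp hb with h | h
    · have := pvBreaksRec_le (row.zip row.tail) 0 b h
      have hz : (row.zip row.tail).length ≤ row.length := by
        rw [List.length_zip]; exact min_le_left _ _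
      omega
    · have : b = row.length := by simpa using h
      omega
  have hcongr : (breaks.zip breaks.tail).foldl (fun b p =>
        let d := (pvPrefix row 0).getD p.2 0 - (pvPrefix row 0).getD p.1 0
        if d > b then d else b) m
      = (breaks.zip breaks.tail).foldl (fun b p =>
        if pvCnt (row.take p.2) - pvCnt (row.take p.1) > b
        then pvCnt (row.take p.2) - pvCnt (row.take p.1) else b) m := by
    apply PySem.List.foldl_congr_mem
    intro acc p hp
    have h1 : p.1 ∈ breaks := (List.of_mem_zip hp).1
    have h2 : p.2 ∈ breaks := List.tail_subset _ (List.of_mem_zip hp).2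
    rw [pvPrefix_getD row 0 p.1 (hbnd _ h1), pvPrefix_getD row 0 p.2 (hbnd _ h2)]
    simp
  rw [hcongr, pvZipFold_map breaks (fun b => pvCnt (row.take b)) m, pvMapG row]
  have := pvMain row "" 0 m 0 le_rfl hm
  simpa using this

-- A's inner loop never decreases the running maximum
theorem pvAInner_ge : ∀ (cs : List String) (b : Int) (prev : String) (m : Int),
    m ≤ pvAInner cs b prev m := by
  intro cs
  induction cs with
  | nil => intro b prev m; simp [pvAInner]
  | cons c cs ih =>
    intro b prev m
    rw [pvAInner]
    refine le_trans ?_ (ih _ _ _)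
    split_ifs <;> omega

theorem pvOuter : ∀ (rows : List (List String)) (m : Int), 0 ≤ m →
    rows.foldl (fun max_blacks row => pvAInner row 0 "" max_blacks) m
      = rows.foldl pvRowBest m := by
  intro rows
  induction rows with
  | nil => intro m _; rfl
  | cons r rs ih =>
    intro m hm
    simp only [List.foldl_cons]
    rw [← pvRow_eq r m hm]
    exact ih _ (le_trans hm (by rw [pvRow_eq r m hm]; exact pvAInner_ge _ _ _ _))

-- ===== VERDICT (by name: the statement is the Claim_ definition above) =====
theorem get_max_blacks_spec : Claim_equal_get_max_blacks := by
  intro matrix _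
  show get_max_blacks matrix = get_max_blacks_alt matrix
  unfold get_max_blacks get_max_blacks_alt
  exact pvOuter matrix 0 le_rfl
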